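-- pv_equiv track=rewrite | github.com/HyunjunJeon/Deepagent-research-context-engineering | deepagents_sourcecode/libs/deepagents/deepagents/middleware/filesystem.py | _file_data_reducer
-- ===== SOURCE A (Python) =====
-- from typing_extensions import TypedDict
--
-- class FileData(TypedDict):
--     """파일 내용을 메타데이터와 함께 저장하기 위한 데이터 구조입니다."""
--
--     content: list[str]
--     """파일의 각 라인."""
--
--     created_at: str
--     """파일 생성 시각(ISO 8601)."""
--
--     modified_at: str
--     """파일 마지막 수정 시각(ISO 8601)."""
--
-- def _file_data_reducer(left: dict[str, FileData] | None, right: dict[str, FileData | None]) -> dict[str, FileData]: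
--     """파일 업데이트를 병합하며, 삭제를 지원합니다.
--
--     오른쪽 딕셔너리의 값이 `None`인 엔트리를 “삭제 마커”로 취급해 삭제를 구현합니다.
--     LangGraph의 state 관리에서 annotated reducer가 state 업데이트 병합 방식을 제어한다는
--     전제에 맞춰 설계되었습니다.
--
--     Args:
--         left: Existing files dictionary. May be `None` during initialization.
--         right: New files dictionary to merge. Files with `None` values are
--             treated as deletion markers and removed from the result.
--
--     Returns:
--         Merged dictionary where right overwrites left for matching keys,
--         and `None` values in right trigger deletions.
--
--     Example:
--         ```python
--         existing = {"/file1.txt": FileData(...), "/file2.txt": FileData(...)}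
--         updates = {"/file2.txt": None, "/file3.txt": FileData(...)}
--         result = file_data_reducer(existing, updates)
--         # Result: {"/file1.txt": FileData(...), "/file3.txt": FileData(...)}
--         ```
--     """
--     if left is None:
--         return {k: v for k, v in right.items() if v is not None}
--
--     result = {**left}
--     for key, value in right.items():
--         if value is None:
--             result.pop(key, None)
--         else:
--             result[key] = value
--     return result
-- ===== SOURCE B (Python) =====
-- def _file_data_reducer(left, right):
--     base = left if left is not None else {}
--     result = {}
--     # pass 1: surviving/updated left entries, in left's order
--     for k, v in base.items():
--         if k in right:
--             rv = right[k]
--             if rv is not None: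
--                 result[k] = rv
--         else:
--             result[k] = v
--     # pass 2: brand-new right entries, in right's order
--     for k, v in right.items():
--         if k not in base and v is not None:
--             result[k] = v
--     return result
-- ===== Notes on version B (the rewrite author's own statement) =====
-- stated objective: alternative
-- what changed: A copies left and then mutates it per right entry (pop on None, assign otherwise); B never mutates a copy: it builds the result from scratch in two staged passes, first emitting each left entry filtered/updated via a lookup into right, then appending the brand-new non-None right entries.
import Mathlib
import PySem

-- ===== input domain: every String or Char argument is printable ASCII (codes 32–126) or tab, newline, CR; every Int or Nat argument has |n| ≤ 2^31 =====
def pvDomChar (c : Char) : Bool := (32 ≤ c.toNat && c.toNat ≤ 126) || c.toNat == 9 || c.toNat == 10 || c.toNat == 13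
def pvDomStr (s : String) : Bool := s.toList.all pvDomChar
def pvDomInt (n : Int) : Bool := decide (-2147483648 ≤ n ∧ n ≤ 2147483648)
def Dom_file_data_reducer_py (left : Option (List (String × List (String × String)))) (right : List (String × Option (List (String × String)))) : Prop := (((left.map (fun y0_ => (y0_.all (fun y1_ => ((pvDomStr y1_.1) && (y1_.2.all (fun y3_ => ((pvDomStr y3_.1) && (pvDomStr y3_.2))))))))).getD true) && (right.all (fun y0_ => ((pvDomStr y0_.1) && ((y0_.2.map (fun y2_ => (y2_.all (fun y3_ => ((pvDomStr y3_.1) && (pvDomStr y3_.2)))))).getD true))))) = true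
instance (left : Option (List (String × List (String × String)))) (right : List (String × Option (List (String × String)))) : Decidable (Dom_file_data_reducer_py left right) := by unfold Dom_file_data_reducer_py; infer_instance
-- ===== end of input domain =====

-- B builds the result from scratch in two staged passes (left entries filtered/updated via lookups
-- into right, then the brand-new non-None right entries) instead of A's copy-left-then-mutate loop.

-- ===== PORT A =====
-- one step of A's merge loop: 'if value is None: result.pop(key, None) else: result[key] = value'
def pvStepA {κ ν : Type} [BEq κ] (d : PySem.Dict κ ν) (kv : κ × Option ν) : PySem.Dict κ ν :=
  match kv.2 with
  | none => d.erase kv.1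
  | some v => d.insert kv.1 v

-- one step of the dict comprehension '{k: v for k, v in right.items() if v is not None}'
def pvStepSkip {κ ν : Type} [BEq κ] (d : PySem.Dict κ ν) (kv : κ × Option ν) : PySem.Dict κ ν :=
  match kv.2 with
  | some v => d.insert kv.1 v
  | none => d

def file_data_reducer_py (left : Option (List (String × List (String × String)))) (right : List (String × Option (List (String × String)))) : List (String × List (String × String)) :=
  match left with
  | none =>
      -- {k: v for k, v in right.items() if v is not None}
      (right.foldl pvStepSkip PySem.Dict.empty).items
  | some l =>
      -- result = {**left}
      let result := l.foldl (fun (d : PySem.Dict String (List (String × String))) kv => d.insert kv.1 kv.2) PySem.Dict.empty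
      -- for key, value in right.items(): if value is None: result.pop(key, None) else: result[key] = value
      (right.foldl pvStepA result).items

-- ===== PORT B =====
-- pass 1 step: 'if k in right: rv = right[k]; if rv is not None: result[k] = rv  else: result[k] = v'
def pvStepL {ν : Type} (rd : PySem.Dict String (Option ν)) (out : PySem.Dict String ν) (kv : String × ν) : PySem.Dict String ν :=
  match rd.get? kv.1 with
  | none => out.insert kv.1 kv.2
  | some none => out
  | some (some rv) => out.insert kv.1 rv

-- pass 2 step: 'if k not in base and v is not None: result[k] = v'
def pvStepR {ν : Type} (ld : PySem.Dict String ν) (out : PySem.Dict String ν) (kv : String × Option ν) : PySem.Dict String ν :=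
  if ld.contains kv.1 then out
  else match kv.2 with
    | none => out
    | some v => out.insert kv.1 v

def file_data_reducer_py_alt (left : Option (List (String × List (String × String)))) (right : List (String × Option (List (String × String)))) : List (String × List (String × String)) :=
  -- base = left if left is not None else {}
  let base := left.getD []
  let rd := PySem.Dict.mk right
  let ld := PySem.Dict.mk base
  -- pass 1: surviving/updated left entries, in left's order
  let out1 := base.foldl (pvStepL rd) PySem.Dict.empty
  -- pass 2: brand-new right entries, in right's order
  (right.foldl (pvStepR ld) out1).items

-- ===== PRECONDITION & SPEC =====
-- Pre_ excludes association lists with duplicate keys (in left or right): a Python dict can never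
-- contain a duplicate key, so such lists encode no Python input, and the ports' behaviour on them
-- is an artefact of the association-list encoding.
def Pre_file_data_reducer_py (left : Option (List (String × List (String × String)))) (right : List (String × Option (List (String × String)))) : Prop :=
  ((left.getD []).map Prod.fst).Nodup ∧ (right.map Prod.fst).Nodup
instance (left : Option (List (String × List (String × String)))) (right : List (String × Option (List (String × String)))) : Decidable (Pre_file_data_reducer_py left right) := by unfold Pre_file_data_reducer_py; infer_instance

def pvWitness_file_data_reducer_py : (Option (List (String × List (String × String)))) × (List (String × Option (List (String × String)))) :=
  (some [("a", [("content", "x")])], [("a", none), ("b", some [("content", "y")])])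

def Spec_file_data_reducer_py (left : Option (List (String × List (String × String)))) (right : List (String × Option (List (String × String)))) (out : List (String × List (String × String))) : Prop := out = file_data_reducer_py_alt left right
instance (left : Option (List (String × List (String × String)))) (right : List (String × Option (List (String × String)))) (out : List (String × List (String × String))) : Decidable (Spec_file_data_reducer_py left right out) := by unfold Spec_file_data_reducer_py; infer_instance

-- ===== CLAIM (what is proved, stated in full; the proofs are below) =====
def Claim_equal_file_data_reducer_py : Prop := ∀ (left : Option (List (String × List (String × String)))) (right : List (String × Option (List (String × String)))), Dom_file_data_reducer_py left right → Pre_file_data_reducer_py left right → Spec_file_data_reducer_py left right (file_data_reducer_py left right)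

-- ===== LEMMAS AND PROOFS =====

-- the fate of one left entry under the right overlay
def pvAdj {ν : Type} (rd : PySem.Dict String (Option ν)) (p : String × ν) : Option (String × ν) :=
  match rd.get? p.1 with
  | none => some p
  | some none => none
  | some (some v) => some (p.1, v)

-- the contribution of one right entry as a brand-new key (w.r.t. a left dict d)
def pvNew {ν : Type} (d : PySem.Dict String ν) (kv : String × Option ν) : Option (String × ν) :=
  if d.contains kv.1 then none else kv.2.map (fun v => (kv.1, v))

theorem pvItems_erase {κ ν : Type} [BEq κ] (d : PySem.Dict κ ν) (k : κ) :
    (d.erase k).items = d.items.filter (fun p => !(p.1 == k)) := rfl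

theorem pvAdj_key {ν : Type} (rd : PySem.Dict String (Option ν)) (p q : String × ν)
    (h : pvAdj rd p = some q) : q.1 = p.1 := by
  unfold pvAdj at h
  rcases hg : rd.get? p.1 with _ | (_ | v) <;> rw [hg] at h <;>
    simp only [Option.some.injEq, reduceCtorEq] at h <;> exact h ▸ rfl

theorem pvAdj_cons_eq {ν : Type} (k : String) (w : Option ν) (R' : List (String × Option ν))
    (p : String × ν) (he : p.1 = k) :
    pvAdj (PySem.Dict.mk ((k, w) :: R')) p
      = match w with | none => none | some v => some (p.1, v) := by
  have hb : (k == p.1) = true := by simp [he]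
  cases w <;> simp [pvAdj, PySem.Dict.get?_mk_cons, hb]

theorem pvAdj_cons_ne {ν : Type} (k : String) (w : Option ν) (R' : List (String × Option ν))
    (p : String × ν) (he : p.1 ≠ k) :
    pvAdj (PySem.Dict.mk ((k, w) :: R')) p = pvAdj (PySem.Dict.mk R') p := by
  have hb : (k == p.1) = false := by simp [Ne.symm he]
  simp [pvAdj, PySem.Dict.get?_mk_cons, hb]

theorem pvNew_head {ν : Type} (d : PySem.Dict String ν) (k : String) (w : Option ν) :
    pvNew d (k, w)
      = if d.contains k then none else w.map (fun v => (k, v)) := rfl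

theorem pvAdjSelf {ν : Type} (rd : PySem.Dict String (Option ν)) (k : String) (v : ν)
    (hk : rd.get? k = none) : pvAdj rd (k, v) = some (k, v) := by
  simp [pvAdj, hk]

-- B's pass 1 appends, per left entry, its fate under the overlay
theorem pvPhase1 {ν : Type} (rd : PySem.Dict String (Option ν))
    (L : List (String × ν)) (d : PySem.Dict String ν)
    (hfresh : ∀ p ∈ L, d.contains p.1 = false) (hnd : (L.map Prod.fst).Nodup) :
    (L.foldl (pvStepL rd) d).items = d.items ++ L.filterMap (pvAdj rd) := by
  induction L generalizing d with
  | nil => simp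
  | cons p t ih =>
      obtain ⟨k, v⟩ := p
      simp only [List.map_cons, List.nodup_cons] at hnd
      have hfk : d.contains k = false := hfresh (k, v) List.mem_cons_self
      have hfresh' : ∀ (w : ν), ∀ q ∈ t, (d.insert k w).contains q.1 = false := by
        intro w q hq
        rw [PySem.Dict.contains_insert]
        have hne : (q.1 == k) = false := by
          have : q.1 ∈ t.map Prod.fst := List.mem_map.mpr ⟨q, hq, rfl⟩
          simp only [beq_eq_false_iff_ne, ne_eq]
          intro he; exact hnd.1 (he ▸ this)
        rw [hne, Bool.false_or]
        exact hfresh q (List.mem_cons_of_mem _ hq)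
      simp only [List.foldl_cons, List.filterMap_cons]
      rcases hg : rd.get? k with _ | (_ | rv)
      · have hh : pvAdj rd (k, v) = some (k, v) := by simp [pvAdj, hg]
        simp only [pvStepL, hg, hh]
        rw [ih _ (hfresh' v) hnd.2, PySem.Dict.items_insert_of_not_contains d v hfk]
        simp
      · have hh : pvAdj rd (k, v) = none := by simp [pvAdj, hg]
        simp only [pvStepL, hg, hh]
        exact ih _ (fun q hq => hfresh q (List.mem_cons_of_mem _ hq)) hnd.2
      · have hh : pvAdj rd (k, v) = some (k, rv) := by simp [pvAdj, hg]
        simp only [pvStepL, hg, hh]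
        rw [ih _ (hfresh' rv) hnd.2, PySem.Dict.items_insert_of_not_contains d rv hfk]
        simp

-- B's pass 2 appends, per right entry, its brand-new contribution
theorem pvPhase2 {ν : Type} (ld : PySem.Dict String ν)
    (R : List (String × Option ν)) (d : PySem.Dict String ν)
    (h : ∀ p ∈ R, ld.contains p.1 = false → d.contains p.1 = false)
    (hnd : (R.map Prod.fst).Nodup) :
    (R.foldl (pvStepR ld) d).items = d.items ++ R.filterMap (pvNew ld) := by
  induction R generalizing d with
  | nil => simp
  | cons p t ih =>
      obtain ⟨k, w⟩ := p
      simp only [List.map_cons, List.nodup_cons] at hnd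
      simp only [List.foldl_cons, List.filterMap_cons, pvNew_head]
      by_cases hc : ld.contains k = true
      · simp only [pvStepR, hc, if_true]
        rw [ih _ (fun q hq => h q (List.mem_cons_of_mem _ hq)) hnd.2]
      · have hc' : ld.contains k = false := by simpa using hc
        simp only [pvStepR, hc', Bool.false_eq_true, if_false]
        cases w with
        | none =>
            rw [ih _ (fun q hq => h q (List.mem_cons_of_mem _ hq)) hnd.2]
            simp
        | some v =>
            have hdk : d.contains k = false := h (k, some v) List.mem_cons_self hc'
            have hfresh' : ∀ q ∈ t, ld.contains q.1 = false → (d.insert k v).contains q.1 = false := by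
              intro q hq hlq
              rw [PySem.Dict.contains_insert]
              have hne : (q.1 == k) = false := by
                have : q.1 ∈ t.map Prod.fst := List.mem_map.mpr ⟨q, hq, rfl⟩
                simp only [beq_eq_false_iff_ne, ne_eq]
                intro he; exact hnd.1 (he ▸ this)
              rw [hne, Bool.false_or]
              exact h q (List.mem_cons_of_mem _ hq) hlq
            rw [ih _ hfresh' hnd.2, PySem.Dict.items_insert_of_not_contains d v hdk]
            simp

-- erasing k from d and consuming the (k, none) marker commute with the overlay view
theorem pvAdj_cons_none {ν : Type} (k : String) (R' : List (String × Option ν))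
    (items : List (String × ν)) :
    items.filterMap (pvAdj (PySem.Dict.mk ((k, none) :: R')))
      = (items.filter (fun p => !(p.1 == k))).filterMap (pvAdj (PySem.Dict.mk R')) := by
  induction items with
  | nil => rfl
  | cons p t ih =>
      by_cases he : p.1 = k
      · have hb : (p.1 == k) = true := by simp [he]
        rw [List.filterMap_cons, pvAdj_cons_eq k none R' p he, List.filter_cons]
        simp only [hb, Bool.not_true, Bool.false_eq_true, if_false]
        exact ih
      · have hb : (p.1 == k) = false := by simp [he]
        rw [List.filter_cons]
        simp only [hb, Bool.not_false, if_true]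
        rw [List.filterMap_cons, List.filterMap_cons, pvAdj_cons_ne k none R' p he, ih]

-- overwriting k in d and consuming the (k, some v) marker commute with the overlay view
theorem pvAdj_cons_some {ν : Type} (k : String) (v : ν) (R' : List (String × Option ν))
    (items : List (String × ν)) (hk : (PySem.Dict.mk R').get? k = none) :
    (items.map (fun p => if p.1 == k then (k, v) else p)).filterMap (pvAdj (PySem.Dict.mk R'))
      = items.filterMap (pvAdj (PySem.Dict.mk ((k, some v) :: R'))) := by
  induction items with
  | nil => rfl
  | cons p t ih =>
      rw [List.map_cons, List.filterMap_cons, List.filterMap_cons]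
      by_cases he : p.1 = k
      · have hm : (if (p.1 == k) = true then (k, v) else p) = (k, v) := by simp [he]
        rw [hm]
        simp only [pvAdjSelf _ k v hk, pvAdj_cons_eq k (some v) R' p he, he, ih]
      · have hb : (p.1 == k) = false := by simp [he]
        simp only [hb, Bool.false_eq_true, if_false, pvAdj_cons_ne k (some v) R' p he, ih]

-- the characterisation of A's merge loop: overlay view of d, then the brand-new right entries
theorem pvMainA {ν : Type} (R : List (String × Option ν)) (d : PySem.Dict String ν)
    (hnd : (R.map Prod.fst).Nodup) :
    (R.foldl pvStepA d).items
      = d.items.filterMap (pvAdj (PySem.Dict.mk R)) ++ R.filterMap (pvNew d) := by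
  induction R generalizing d with
  | nil =>
      simp only [List.foldl_nil, List.filterMap_nil, List.append_nil]
      have h : ∀ p ∈ d.items, pvAdj (PySem.Dict.mk ([] : List (String × Option ν))) p = some p := by
        intro p _; rfl
      rw [List.filterMap_congr h, List.filterMap_some]
  | cons p t ih =>
      obtain ⟨k, w⟩ := p
      simp only [List.map_cons, List.nodup_cons] at hnd
      have hkt : (PySem.Dict.mk t).get? k = none := by
        rw [PySem.Dict.get?_eq_none_iff_not_mem_keys]
        simpa using hnd.1
      have hnew : ∀ (d' : PySem.Dict String ν), (∀ x, x ≠ k → d'.contains x = d.contains x) →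
          t.filterMap (pvNew d') = t.filterMap (pvNew d) := by
        intro d' hd'
        apply List.filterMap_congr
        intro q hq
        have hne : q.1 ≠ k := by
          intro he
          exact hnd.1 (he ▸ List.mem_map.mpr ⟨q, hq, rfl⟩)
        simp [pvNew, hd' q.1 hne]
      simp only [List.foldl_cons, List.filterMap_cons, pvNew_head]
      cases w with
      | none =>
          simp only [pvStepA]
          have hct : ∀ x, x ≠ k → (d.erase k).contains x = d.contains x := by
            intro x hx
            simp only [PySem.Dict.contains, pvItems_erase, List.any_filter]
            apply List.any_congr rfl
            intro p
            by_cases hp : (p.1 == x) = true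
            · have hpx : p.1 = x := by simpa using hp
              simp [hpx, hx]
            · simp only [Bool.not_eq_true] at hp
              simp [hp]
          rw [ih _ hnd.2, pvItems_erase, pvAdj_cons_none k t d.items, hnew _ hct]
          simp
      | some v =>
          simp only [pvStepA]
          rw [ih _ hnd.2]
          have hcont : ∀ x, x ≠ k → (d.insert k v).contains x = d.contains x := by
            intro x hx
            rw [PySem.Dict.contains_insert]
            have hxk : (x == k) = false := by simp [hx]
            simp [hxk]
          rw [hnew _ hcont]
          by_cases hc : d.contains k = true
          · rw [PySem.Dict.items_insert_of_contains d v hc,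
              pvAdj_cons_some k v t d.items hkt]
            simp [hc]
          · have hc' : d.contains k = false := by simpa using hc
            rw [PySem.Dict.items_insert_of_not_contains d v hc', List.filterMap_append]
            have h1 : [(k, v)].filterMap (pvAdj (PySem.Dict.mk t)) = [(k, v)] := by
              simp only [List.filterMap_cons, pvAdjSelf _ k v hkt, List.filterMap_nil]
            have h2 : d.items.filterMap (pvAdj (PySem.Dict.mk ((k, some v) :: t)))
                = d.items.filterMap (pvAdj (PySem.Dict.mk t)) := by
              rw [← pvAdj_cons_some k v t d.items hkt]
              have hmap : d.items.map (fun p => if p.1 == k then (k, v) else p) = d.items := by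
                conv_rhs => rw [← List.map_id d.items]
                apply List.map_congr_left
                intro p hp
                have hpk : (p.1 == k) = false := by
                  simp only [PySem.Dict.contains, List.any_eq_false] at hc'
                  exact Bool.eq_false_iff.mpr (hc' p hp)
                simp [hpk, id]
              rw [hmap]
            rw [h1, h2]
            simp [hc']

-- keys produced by pass 1 all come from the left list
theorem pvContains_phase1 {ν : Type} (rd : PySem.Dict String (Option ν)) (L : List (String × ν))
    (q : String)
    (h : (PySem.Dict.mk (L.filterMap (pvAdj rd))).contains q = true) :
    (PySem.Dict.mk L).contains q = true := by
  simp only [PySem.Dict.contains, List.any_eq_true] at h ⊢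
  obtain ⟨p, hp, hpq⟩ := h
  obtain ⟨p0, hp0, hmap⟩ := List.mem_filterMap.mp hp
  exact ⟨p0, hp0, by rw [pvAdj_key rd p0 p hmap] at hpq; exact hpq⟩

-- with no left dict, B's pass-2 step is exactly A's comprehension step
theorem pvStepR_empty {ν : Type} (out : PySem.Dict String ν) (kv : String × Option ν) :
    pvStepR (PySem.Dict.mk []) out kv = pvStepSkip out kv := by
  obtain ⟨k, w⟩ := kv
  cases w <;> rfl

theorem pvFoldl_stepR_empty {ν : Type} (R : List (String × Option ν)) (d : PySem.Dict String ν) :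
    R.foldl (pvStepR (PySem.Dict.mk [])) d = R.foldl pvStepSkip d := by
  induction R generalizing d with
  | nil => rfl
  | cons p t ih => rw [List.foldl_cons, List.foldl_cons, pvStepR_empty, ih]

-- ===== VERDICT (by name: the statement is the Claim_ definition above) =====
theorem file_data_reducer_py_spec : Claim_equal_file_data_reducer_py := by
  intro left right _hdom hpre
  obtain ⟨hl, hr⟩ := hpre
  unfold Spec_file_data_reducer_py file_data_reducer_py file_data_reducer_py_alt
  cases left with
  | none =>
      simp only [Option.getD, List.foldl_nil]
      rw [pvFoldl_stepR_empty]
  | some l =>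
      simp only [Option.getD] at hl ⊢
      -- the copied dict {**left} is literally the left association list
      have hItems : (l.foldl (fun (d : PySem.Dict String (List (String × String))) kv => d.insert kv.1 kv.2) PySem.Dict.empty).items = l := by
        have := PySem.Dict.items_foldl_insert_fresh l Prod.fst Prod.snd PySem.Dict.empty
          (fun a _ => rfl) hl
        simpa using this
      have hdL : (l.foldl (fun (d : PySem.Dict String (List (String × String))) kv => d.insert kv.1 kv.2) PySem.Dict.empty) = PySem.Dict.mk l :=
        PySem.Dict.ext hItems
      rw [pvMainA right _ hr, hdL, pvPhase2 (PySem.Dict.mk l) right _ ?_ hr,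
        pvPhase1 (PySem.Dict.mk right) l PySem.Dict.empty (fun p _ => rfl) hl]
      · rfl
      · intro p _ hp
        have h1 : (l.foldl (pvStepL (PySem.Dict.mk right)) PySem.Dict.empty)
            = PySem.Dict.mk (l.filterMap (pvAdj (PySem.Dict.mk right))) := by
          apply PySem.Dict.ext
          rw [pvPhase1 (PySem.Dict.mk right) l PySem.Dict.empty (fun p _ => rfl) hl]
          rfl
        rw [h1]
        by_contra hc
        simp only [Bool.not_eq_false] at hc
        rw [pvContains_phase1 (PySem.Dict.mk right) l p.1 hc] at hp
        exact absurd hp (by simp)
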